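-- pv_equiv track=rewrite | github.com/henryzhongsc/lottery_regulated_grouped_kernel_pruning | utils.py | tmi_filter_ranking
-- ===== SOURCE A (Python) =====
-- def tmi_filter_ranking(tmi_scores):
--     tmi_ranked = {i:[] for i in range(len(tmi_scores[0]))}
--     for tmi_k in tmi_scores:
--         tmi_k_ranked = [(i, v) for i, v in enumerate(tmi_k)]
--         tmi_k_ranked.sort(key = lambda t: t[1], reverse = True)
--
--         for filter_rank, (filter_i, _) in enumerate(tmi_k_ranked):
--             tmi_ranked[filter_i] = tmi_ranked[filter_i] + [filter_rank]
--
--     tmi_rank_sum = []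
--     for filter_i, filter_i_ranks in tmi_ranked.items():
--         tmi_rank_sum.append((filter_i, sum(filter_i_ranks)))
--     tmi_rank_sum.sort(key = lambda t: t[1])
--
--     return [i[0] for i in tmi_rank_sum]
-- ===== SOURCE B (Python) =====
-- def tmi_filter_ranking(tmi_scores):
--     n = len(tmi_scores[0])
--     sums = [0] * n
--     for row in tmi_scores:
--         for i in range(len(row)):
--             v = row[i]
--             sums[i] += sum(w > v for w in row) + sum(w == v for w in row[:i])
--     order = [0] * n
--     for i in range(n):
--         p = sum(s < sums[i] for s in sums) + sum(s == sums[i] for s in sums[:i])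
--         order[p] = i
--     return order
-- ===== Notes on version B (the rewrite author's own statement) =====
-- stated objective: alternative
-- what changed: B computes each filter's per-row rank and its final output position by direct comparison counting (count strictly-better entries plus tied-but-earlier entries, Borda-count style) over plain integer lists, with no sorting anywhere and no dict of growing rank lists, whereas A sorts every row's (index,value) pairs, accumulates per-filter rank lists by list concatenation and sorts the summed ranks.
import Mathlib
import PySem

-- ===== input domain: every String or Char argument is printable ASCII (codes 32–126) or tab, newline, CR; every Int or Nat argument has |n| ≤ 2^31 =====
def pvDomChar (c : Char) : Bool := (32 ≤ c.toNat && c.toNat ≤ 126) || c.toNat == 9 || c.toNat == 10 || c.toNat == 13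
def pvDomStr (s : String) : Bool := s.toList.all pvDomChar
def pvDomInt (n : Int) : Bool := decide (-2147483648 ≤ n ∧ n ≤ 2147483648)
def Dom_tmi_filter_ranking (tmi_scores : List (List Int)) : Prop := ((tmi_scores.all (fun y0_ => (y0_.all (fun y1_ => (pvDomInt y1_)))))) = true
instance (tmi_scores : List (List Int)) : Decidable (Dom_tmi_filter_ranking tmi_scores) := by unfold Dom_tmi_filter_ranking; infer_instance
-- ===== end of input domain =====

-- B replaces A's sort-based ranking by direct comparison counting (Borda-count style): each
-- filter's per-row rank and its final output position are computed by counting strictly-better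
-- and tied-but-earlier entries, with no sorting and no dict of rank lists; alternative algorithm,
-- same return value.

-- ===== PORT A =====
-- dict reads tmi_ranked[filter_i] are ported with getD; Pre_ excludes the inputs where Python raises
-- (IndexError on tmi_scores[0] for [], KeyError when a row is longer than the first row).
def tmi_filter_ranking (tmi_scores : List (List Int)) : List Int :=
  let tmi_ranked : PySem.Dict Int (List Int) :=
    (PySem.List.pyRange 0 (PySem.List.len (PySem.List.pyGetD tmi_scores 0 [])) 1).foldl
      (fun d i => d.insert i []) PySem.Dict.empty
  let tmi_ranked :=
    tmi_scores.foldl (fun d tmi_k =>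
      let tmi_k_ranked := PySem.List.sorted (PySem.List.enumerate tmi_k) (fun t => t.2) true
      (PySem.List.enumerate tmi_k_ranked).foldl
        (fun d p => d.insert p.2.1 (d.getD p.2.1 [] ++ [p.1])) d) tmi_ranked
  let tmi_rank_sum :=
    tmi_ranked.items.foldl (fun acc p => acc ++ [(p.1, p.2.sum)]) ([] : List (Int × Int))
  (PySem.List.sorted tmi_rank_sum (fun t => t.2) false).map (fun t => t.1)

-- ===== PORT B =====
-- sum(w > v for w in row) etc. are 0/1-sums over the iterated list, ported as such.
def tmi_filter_ranking_alt (tmi_scores : List (List Int)) : List Int :=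
  let n := PySem.List.len (PySem.List.pyGetD tmi_scores 0 [])
  let sums : List Int := PySem.List.pyRepeat [(0 : Int)] n
  let sums :=
    tmi_scores.foldl (fun sums row =>
      (PySem.List.pyRange 0 (PySem.List.len row) 1).foldl (fun sums i =>
        let v := PySem.List.pyGetD row i 0
        PySem.List.pySetD sums i (PySem.List.pyGetD sums i 0
          + ((row.map (fun w => if v < w then (1 : Int) else 0)).sum
             + ((PySem.List.slice row none (some i)).map
                  (fun w => if w = v then (1 : Int) else 0)).sum))) sums) sums
  let order : List Int := PySem.List.pyRepeat [(0 : Int)] n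
  (PySem.List.pyRange 0 n 1).foldl (fun order i =>
    let p := (sums.map (fun s => if s < PySem.List.pyGetD sums i 0 then (1 : Int) else 0)).sum
             + ((PySem.List.slice sums none (some i)).map
                  (fun s => if s = PySem.List.pyGetD sums i 0 then (1 : Int) else 0)).sum
    PySem.List.pySetD order p i) order

-- ===== PRECONDITION & SPEC =====
-- Pre_ excludes exactly the inputs where Python A raises: tmi_scores[0] (IndexError on []) and the
-- KeyError when some row is longer than the first row (tmi_ranked[filter_i] with filter_i not a key).
def Pre_tmi_filter_ranking (tmi_scores : List (List Int)) : Prop :=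
  tmi_scores ≠ [] ∧ ∀ row ∈ tmi_scores, row.length ≤ (tmi_scores.headD []).length
instance (tmi_scores : List (List Int)) : Decidable (Pre_tmi_filter_ranking tmi_scores) := by unfold Pre_tmi_filter_ranking; infer_instance
def pvWitness_tmi_filter_ranking : List (List Int) := [[1, 2], [2, 1]]
def Spec_tmi_filter_ranking (tmi_scores : List (List Int)) (out : List Int) : Prop := out = tmi_filter_ranking_alt tmi_scores
instance (tmi_scores : List (List Int)) (out : List Int) : Decidable (Spec_tmi_filter_ranking tmi_scores out) := by unfold Spec_tmi_filter_ranking; infer_instance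

-- ===== CLAIM (what is proved, stated in full; the proofs are below) =====
def Claim_equal_tmi_filter_ranking : Prop := ∀ (tmi_scores : List (List Int)), Dom_tmi_filter_ranking tmi_scores → Pre_tmi_filter_ranking tmi_scores → Spec_tmi_filter_ranking tmi_scores (tmi_filter_ranking tmi_scores)

-- ===== LEMMAS AND PROOFS =====

-- strict "comes-before" order of Python's stable ascending sort by `key` on index-tagged pairs
def pvR (key : Int × Int → Int) (a b : Int × Int) : Prop :=
  key a < key b ∨ (key a = key b ∧ a.1 < b.1)

def pvLtB (key : Int × Int → Int) (x q : Int × Int) : Bool :=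
  decide (key q < key x) || (decide (key q = key x) && decide (q.1 < x.1))

-- per-row comparison count of B: strictly greater anywhere + equal and earlier
def pvCnt (row : List Int) (j : Nat) : Int :=
  ((row.countP (fun w => decide (row.getD j 0 < w)) : Int)
   + ((row.take j).countP (fun w => decide (w = row.getD j 0)) : Int))

def pvRowCnt (row : List Int) (j : Int) : Int :=
  if 0 ≤ j ∧ j < (row.length : Int) then pvCnt row j.toNat else 0

-- output position count of B
def pvPos (fs : List Int) (t : Nat) : Nat :=
  fs.countP (fun s => decide (s < fs.getD t 0)) + (fs.take t).countP (fun s => decide (s = fs.getD t 0))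

-- B's per-row loop body, named for the proofs (definitionally the lambda in the port)
def pvStepB (sums row : List Int) : List Int :=
  (PySem.List.pyRange 0 (PySem.List.len row) 1).foldl (fun sums i =>
    let v := PySem.List.pyGetD row i 0
    PySem.List.pySetD sums i (PySem.List.pyGetD sums i 0
      + ((row.map (fun w => if v < w then (1 : Int) else 0)).sum
         + ((PySem.List.slice row none (some i)).map
              (fun w => if w = v then (1 : Int) else 0)).sum))) sums

theorem pv_key_le_of_R (key : Int × Int → Int) {a b : Int × Int} (h : pvR key a b) :
    key a ≤ key b := by
  rcases h with h | ⟨h, _⟩ <;> omega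

theorem pv_insertBy_pairwise (key : Int × Int → Int) (x : Int × Int) :
    ∀ acc : List (Int × Int), acc.Pairwise (pvR key) → (∀ y ∈ acc, y.1 < x.1) →
    (PySem.List.insertBy (fun a b => decide (key a < key b)) x acc).Pairwise (pvR key) := by
  intro acc
  induction acc with
  | nil => intro _ _; simp [PySem.List.insertBy, List.pairwise_cons]
  | cons y t ih =>
    intro hp hlt
    rw [List.pairwise_cons] at hp
    by_cases hb : key x < key y
    · rw [show PySem.List.insertBy (fun a b => decide (key a < key b)) x (y :: t)
          = x :: y :: t from by simp [PySem.List.insertBy, hb]]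
      refine List.pairwise_cons.mpr ⟨?_, List.pairwise_cons.mpr ⟨hp.1, hp.2⟩⟩
      intro z hz
      rcases List.mem_cons.mp hz with rfl | hz
      · exact Or.inl hb
      · exact Or.inl (lt_of_lt_of_le hb (pv_key_le_of_R key (hp.1 z hz)))
    · rw [show PySem.List.insertBy (fun a b => decide (key a < key b)) x (y :: t)
          = y :: PySem.List.insertBy (fun a b => decide (key a < key b)) x t from by
            simp [PySem.List.insertBy, hb]]
      refine List.pairwise_cons.mpr ⟨?_, ih hp.2 (fun z hz => hlt z (List.mem_cons_of_mem _ hz))⟩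
      intro z hz
      rw [PySem.List.mem_insertBy] at hz
      rcases hz with rfl | hz
      · rcases lt_or_eq_of_le (not_lt.mp hb) with h | h
        · exact Or.inl h
        · exact Or.inr ⟨h, hlt y (List.mem_cons_self)⟩
      · exact hp.1 z hz

theorem pv_fold_pairwise (key : Int × Int → Int) :
    ∀ (xs acc : List (Int × Int)), acc.Pairwise (pvR key) →
    (∀ y ∈ acc, ∀ z ∈ xs, y.1 < z.1) → xs.Pairwise (fun a b => a.1 < b.1) →
    (xs.foldl (fun acc x => PySem.List.insertBy (fun a b => decide (key a < key b)) x acc) acc).Pairwise (pvR key) := by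
  intro xs
  induction xs with
  | nil => intro acc h _ _; simpa using h
  | cons x t ih =>
    intro acc h1 h2 h3
    rw [List.pairwise_cons] at h3
    rw [List.foldl_cons]
    refine ih _ (pv_insertBy_pairwise key x acc h1 (fun y hy => h2 y hy x List.mem_cons_self)) ?_ h3.2
    intro y hy z hz
    rw [PySem.List.mem_insertBy] at hy
    rcases hy with rfl | hy
    · exact h3.1 z hz
    · exact h2 y hy z (List.mem_cons_of_mem _ hz)

theorem pv_sorted_pairwiseR (key : Int × Int → Int) (xs : List (Int × Int))
    (hx : xs.Pairwise (fun a b => a.1 < b.1)) :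
    (PySem.List.sorted xs key false).Pairwise (pvR key) := by
  rw [PySem.List.sorted_eq_foldl_insertBy]
  exact pv_fold_pairwise key xs [] (by simp) (by simp) hx

-- position of the k-th sorted element = number of inputs strictly before it in the stable order
theorem pv_pos_eq (key : Int × Int → Int) (xs : List (Int × Int))
    (hx : xs.Pairwise (fun a b => a.1 < b.1)) (k : Nat)
    (hk : k < (PySem.List.sorted xs key false).length) :
    xs.countP (pvLtB key ((PySem.List.sorted xs key false)[k])) = k := by
  set S := PySem.List.sorted xs key false with hS
  have hperm : S.Perm xs := PySem.List.sorted_perm xs key false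
  have hpw : S.Pairwise (pvR key) := pv_sorted_pairwiseR key xs hx
  rw [← hperm.countP_eq]
  have hpwg := List.pairwise_iff_getElem.mp hpw
  conv_lhs => rw [← List.take_append_drop k S]
  rw [List.countP_append]
  have hdrop : S.drop k = S[k] :: S.drop (k + 1) := by
    rw [List.getElem_cons_drop]
  rw [hdrop, List.countP_cons]
  have h1 : (S.take k).countP (pvLtB key S[k]) = (S.take k).length := by
    rw [List.countP_eq_length]
    intro a ha
    obtain ⟨j, hj, rfl⟩ := List.mem_take_iff_getElem.mp ha
    have hR := hpwg j k (by omega) hk (by omega)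
    rcases hR with h | ⟨h, h'⟩
    · simp [pvLtB, h]
    · simp [pvLtB, h]
      omega
  have h2 : pvLtB key S[k] S[k] = false := by simp [pvLtB]
  have h3 : (S.drop (k + 1)).countP (pvLtB key S[k]) = 0 := by
    rw [List.countP_eq_zero]
    intro a ha
    obtain ⟨j, hj, rfl⟩ := List.mem_drop_iff_getElem.mp ha
    have hR := hpwg k (k + 1 + j) hk (by omega) (by omega)
    rcases hR with h | ⟨h, h'⟩ <;> simp [pvLtB] <;> omega
  rw [h1, h2, h3]
  simp [List.length_take]
  omega

-- descending stable sort by key = ascending stable sort by -key (Int keys)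
theorem pv_sorted_neg {α : Type} (key : α → Int) (xs : List α) :
    PySem.List.sorted xs key true = PySem.List.sorted xs (fun x => -(key x)) false := by
  rw [PySem.List.sorted_rev_eq_foldl_insertBy, PySem.List.sorted_eq_foldl_insertBy]
  have h : (fun a b => decide (key b < key a)) = (fun a b => decide (-(key a) < -(key b))) := by
    funext a c; simp
  rw [h]

theorem pv_countP_or {α : Type} (p q : α → Bool) :
    ∀ l : List α, (∀ a ∈ l, ¬(p a = true ∧ q a = true)) →
    l.countP (fun a => p a || q a) = l.countP p + l.countP q := by
  intro l
  induction l with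
  | nil => simp
  | cons a t ih =>
    intro h
    rw [List.countP_cons, List.countP_cons, List.countP_cons, ih (fun a ha => h a (List.mem_cons_of_mem _ ha))]
    have := h a List.mem_cons_self
    cases hp : p a <;> cases hq : q a <;> simp [hp, hq] at this ⊢ <;> omega

theorem pv_cnt_enum (P : Int → Bool) (xs : List Int) (s : Int) :
    (PySem.List.enumerate xs s).countP (fun q => P q.2) = xs.countP P := by
  conv_rhs => rw [← PySem.List.map_snd_enumerate xs s]
  rw [List.countP_map]; rfl

theorem pv_cnt_enum_lt (P : Int → Bool) :
    ∀ (xs : List Int) (s t : Int),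
    (PySem.List.enumerate xs s).countP (fun q => P q.2 && decide (q.1 < t))
      = (xs.take (t - s).toNat).countP P := by
  intro xs
  induction xs with
  | nil => intro s t; simp [PySem.List.enumerate_nil]
  | cons x xs ih =>
    intro s t
    rw [PySem.List.enumerate_cons, List.countP_cons]
    by_cases h : s < t
    · rw [show (t - s).toNat = (t - (s + 1)).toNat + 1 from by omega, List.take_succ_cons,
        List.countP_cons, ih]
      simp [h]
      try omega
    · rw [show (t - s).toNat = 0 from by omega, List.take_zero, ih,
        show (t - (s + 1)).toNat = 0 from by omega, List.take_zero]
      simp [h]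

theorem pv_dsum :
    ∀ (L : List (Int × Int × Int)) (d : PySem.Dict Int (List Int)) (j : Int),
    ((L.foldl (fun d p => d.insert p.2.1 (d.getD p.2.1 [] ++ [p.1])) d).getD j []).sum
      = (d.getD j []).sum + ((L.filter (fun p => p.2.1 == j)).map (·.1)).sum := by
  intro L
  induction L with
  | nil => simp
  | cons p t ih =>
    intro d j
    rw [List.foldl_cons, ih, List.filter_cons]
    by_cases h : p.2.1 = j
    · simp [h, List.sum_append]
      ring
    · simp [h, PySem.Dict.getD_insert, Ne.symm h]

theorem pv_filter_enum (u v : List (Int × Int)) (x : Int × Int) (c s : Int)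
    (hx : x.1 = c) (hu : ∀ q ∈ u, q.1 ≠ c) (hv : ∀ q ∈ v, q.1 ≠ c) :
    (PySem.List.enumerate (u ++ x :: v) s).filter (fun p => p.2.1 == c)
      = [(s + u.length, x)] := by
  rw [PySem.List.enumerate_append, List.filter_append, PySem.List.enumerate_cons, List.filter_cons]
  have h1 : (PySem.List.enumerate u s).filter (fun p => p.2.1 == c) = [] := by
    rw [List.filter_eq_nil_iff]
    intro q hq
    obtain ⟨k, hk, rfl⟩ := (PySem.List.mem_enumerate_iff u s q).mp hq
    simpa using hu _ (List.getElem_mem hk)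
  have h2 : (PySem.List.enumerate v (s + ↑u.length + 1)).filter (fun p => p.2.1 == c) = [] := by
    rw [List.filter_eq_nil_iff]
    intro q hq
    obtain ⟨k, hk, rfl⟩ := (PySem.List.mem_enumerate_iff v _ q).mp hq
    simpa using hv _ (List.getElem_mem hk)
  simp [h1, h2, hx]

-- fsts of a stable sort of an enumeration are distinct

theorem pv_nodup_fst_sorted {α : Type} (xs : List α) (key : Int × α → Int) (rev : Bool) :
    ((PySem.List.sorted (PySem.List.enumerate xs) key rev).map (·.1)).Nodup := by
  have hperm := (PySem.List.sorted_perm (PySem.List.enumerate xs) key rev).map (·.1)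
  refine hperm.nodup_iff.mpr ?_
  rw [PySem.List.map_fst_enumerate]
  exact PySem.List.nodup_pyRange_one _ _

theorem pv_pos_eq_mem (key : Int × Int → Int) (xs : List (Int × Int))
    (hx : xs.Pairwise (fun a b => a.1 < b.1)) (x : Int × Int) (u v : List (Int × Int))
    (huv : PySem.List.sorted xs key false = u ++ x :: v) :
    xs.countP (pvLtB key x) = u.length := by
  have hk' : u.length < (PySem.List.sorted xs key false).length := by rw [huv]; simp
  have hcnt := pv_pos_eq key xs hx u.length hk'
  have hg : (PySem.List.sorted xs key false)[u.length]'hk' = x := by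
    simp only [huv]
    rw [List.getElem_append_right (le_refl u.length)]
    simp
  rwa [hg] at hcnt

-- one row of A adds exactly B's comparison count to each filter's rank-list sum
theorem pv_rowA (row : List Int) (d : PySem.Dict Int (List Int)) (j : Int) :
    (((PySem.List.enumerate (PySem.List.sorted (PySem.List.enumerate row) (fun t => t.2) true)).foldl
        (fun d p => d.insert p.2.1 (d.getD p.2.1 [] ++ [p.1])) d).getD j []).sum
      = (d.getD j []).sum + pvRowCnt row j := by
  rw [pv_sorted_neg, pv_dsum]
  congr 1
  by_cases hj : 0 ≤ j ∧ j < (row.length : Int)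
  · -- j is a real filter index of this row
    have hlt : j.toNat < row.length := by omega
    have hmemx : ((j, row.getD j.toNat 0) : Int × Int) ∈ PySem.List.enumerate row := by
      rw [PySem.List.mem_enumerate_iff]
      refine ⟨j.toNat, hlt, ?_⟩
      rw [List.getD_eq_getElem _ _ hlt]
      have : (0 : Int) + (j.toNat : Int) = j := by omega
      rw [this]
    have hmemS : ((j, row.getD j.toNat 0) : Int × Int)
        ∈ PySem.List.sorted (PySem.List.enumerate row) (fun t => -t.2) false := by
      rw [PySem.List.mem_sorted]
      exact hmemx
    obtain ⟨u, v, huv⟩ := List.append_of_mem hmemS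
    have hnd : ((u ++ ((j, row.getD j.toNat 0) : Int × Int) :: v).map (·.1)).Nodup := by
      rw [← huv]; exact pv_nodup_fst_sorted row _ false
    rw [List.map_append, List.map_cons, List.nodup_append] at hnd
    have hu : ∀ q ∈ u, q.1 ≠ j := by
      intro q hq he
      exact hnd.2.2 j (he ▸ List.mem_map_of_mem (f := fun p => p.1) hq) j List.mem_cons_self rfl
    have hv : ∀ q ∈ v, q.1 ≠ j := by
      intro q hq he
      exact (List.nodup_cons.mp hnd.2.1).1 (List.mem_map.mpr ⟨q, hq, he⟩)
    rw [huv, pv_filter_enum u v (j, row.getD j.toNat 0) j 0 rfl hu hv]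
    have hcnt := pv_pos_eq_mem _ (PySem.List.enumerate row)
      (PySem.List.pairwise_lt_enumerate row 0) _ u v huv
    -- convert countP to pvCnt
    have hfn : pvLtB (fun t => -t.2) ((j, row.getD j.toNat 0) : Int × Int) = fun q =>
        (fun q : Int × Int => decide (row.getD j.toNat 0 < q.2)) q
        || ((fun q : Int × Int => decide (q.2 = row.getD j.toNat 0) && decide (q.1 < j)) q) := by
      funext q
      rw [Bool.eq_iff_iff]
      simp [pvLtB]
    rw [hfn, pv_countP_or _ _ _ (by intro a _; simp; omega)] at hcnt
    have e1 : (PySem.List.enumerate row).countP (fun q => decide (row.getD j.toNat 0 < q.2))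
        = row.countP (fun w => decide (row.getD j.toNat 0 < w)) := by
      simpa using pv_cnt_enum (fun w => decide (row.getD j.toNat 0 < w)) row 0
    have e2 : (PySem.List.enumerate row).countP
          (fun q => decide (q.2 = row.getD j.toNat 0) && decide (q.1 < j))
        = (row.take j.toNat).countP (fun w => decide (w = row.getD j.toNat 0)) := by
      have := pv_cnt_enum_lt (fun w => decide (w = row.getD j.toNat 0)) row 0 j
      simpa [show (j - 0).toNat = j.toNat from by omega] using this
    rw [e1, e2] at hcnt
    rw [pvRowCnt, if_pos hj, pvCnt]
    simp only [List.map_cons, List.map_nil, List.sum_cons, List.sum_nil]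
    omega
  · -- j is never a key in this row: the filtered list is empty
    rw [pvRowCnt, if_neg hj]
    rw [show ((PySem.List.enumerate
          (PySem.List.sorted (PySem.List.enumerate row) (fun t => -t.2) false)).filter
            (fun p => p.2.1 == j)) = [] from ?_]
    · simp
    · rw [List.filter_eq_nil_iff]
      intro p hp
      obtain ⟨k, hk, rfl⟩ := (PySem.List.mem_enumerate_iff _ _ p).mp hp
      have hmem : (PySem.List.sorted (PySem.List.enumerate row) (fun t => -t.2) false)[k]
          ∈ PySem.List.enumerate row :=
        (PySem.List.mem_sorted _ _ _ _).mp (List.getElem_mem hk)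
      obtain ⟨k2, hk2, he⟩ := (PySem.List.mem_enumerate_iff _ _ _).mp hmem
      simp [he]
      omega

theorem pv_outerA :
    ∀ (rows : List (List Int)) (d : PySem.Dict Int (List Int)) (j : Int),
    ((rows.foldl (fun d tmi_k =>
        (PySem.List.enumerate (PySem.List.sorted (PySem.List.enumerate tmi_k) (fun t => t.2) true)).foldl
          (fun d p => d.insert p.2.1 (d.getD p.2.1 [] ++ [p.1])) d) d).getD j []).sum
      = (d.getD j []).sum + (rows.map (fun row => pvRowCnt row j)).sum := by
  intro rows
  induction rows with
  | nil => simp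
  | cons row t ih =>
    intro d j
    simp only [List.foldl_cons, List.map_cons, List.sum_cons, ih, pv_rowA]
    ring

theorem pv_update_self (xs : List Int) (s : PySem.Set Int) (h : ∀ x ∈ xs, x ∈ s) :
    PySem.Set.update s xs = s := by
  induction xs generalizing s with
  | nil => rfl
  | cons x t ih =>
    have hx : PySem.Set.add s x = s := by
      simp [PySem.Set.add, PySem.Set.contains, h x List.mem_cons_self]
    show PySem.Set.update (PySem.Set.add s x) t = s
    rw [hx]
    exact ih s (fun y hy => h y (List.mem_cons_of_mem _ hy))

theorem pv_initA_items (m : Int) :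
    ((PySem.List.pyRange 0 m 1).foldl (fun d i => d.insert i ([] : List Int)) PySem.Dict.empty).items
      = (PySem.List.pyRange 0 m 1).map (fun i => (i, ([] : List Int))) := by
  have h := PySem.Dict.items_foldl_insert_fresh (PySem.List.pyRange 0 m 1)
    (fun i => i) (fun _ => ([] : List Int)) PySem.Dict.empty
    (by intro a _; simp [PySem.Dict.contains_empty])
    (by simpa using PySem.List.nodup_pyRange_one 0 m)
  simpa using h

theorem pv_initA_keys (m : Int) :
    ((PySem.List.pyRange 0 m 1).foldl (fun d i => d.insert i ([] : List Int)) PySem.Dict.empty).keys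
      = PySem.List.pyRange 0 m 1 := by
  have h : ∀ (d : PySem.Dict Int (List Int)), d.keys = d.items.map (·.1) := fun d => rfl
  rw [h, pv_initA_items, List.map_map]
  exact List.map_id _

theorem pv_initA_getD (m j : Int) :
    ((PySem.List.pyRange 0 m 1).foldl (fun d i => d.insert i ([] : List Int)) PySem.Dict.empty).getD j []
      = [] := by
  by_cases hmem : j ∈ PySem.List.pyRange 0 m 1
  · exact PySem.Dict.getD_of_mem_items _
      (by rw [pv_initA_items]; exact List.mem_map.mpr ⟨j, hmem, rfl⟩)
      (by rw [pv_initA_keys]; exact PySem.List.nodup_pyRange_one 0 m) []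
  · refine PySem.Dict.getD_of_not_contains _ _ ?_
    rw [PySem.Dict.contains_eq_decide_mem_keys, pv_initA_keys]
    simpa using hmem

theorem pv_keysA (N : Int) :
    ∀ (rows : List (List Int)) (d : PySem.Dict Int (List Int)),
    d.keys = PySem.List.pyRange 0 N 1 → (∀ row ∈ rows, (row.length : Int) ≤ N) →
    ((rows.foldl (fun d tmi_k =>
        (PySem.List.enumerate (PySem.List.sorted (PySem.List.enumerate tmi_k) (fun t => t.2) true)).foldl
          (fun d p => d.insert p.2.1 (d.getD p.2.1 [] ++ [p.1])) d) d).keys)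
      = PySem.List.pyRange 0 N 1 := by
  intro rows
  induction rows with
  | nil => intro d h _; simpa using h
  | cons row t ih =>
    intro d hk hb
    rw [List.foldl_cons]
    refine ih _ ?_ (fun r hr => hb r (List.mem_cons_of_mem _ hr))
    rw [PySem.Dict.keys_foldl_insert_key, hk]
    apply pv_update_self
    intro x hx
    obtain ⟨p, hp, rfl⟩ := List.mem_map.mp hx
    have hp2 : p.2 ∈ PySem.List.sorted (PySem.List.enumerate row) (fun t => t.2) true := by
      obtain ⟨k, hkk, rfl⟩ := (PySem.List.mem_enumerate_iff _ _ p).mp hp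
      exact List.getElem_mem hkk
    have hp3 : p.2 ∈ PySem.List.enumerate row := (PySem.List.mem_sorted _ _ _ _).mp hp2
    obtain ⟨k, hkk, hpe⟩ := (PySem.List.mem_enumerate_iff _ _ p.2).mp hp3
    rw [PySem.List.mem_pyRange_one]
    have := hb row List.mem_cons_self
    rw [hpe]
    refine ⟨by simp, by simp; omega⟩

theorem pv_getD_set (s : List Int) (i j : Nat) (a : Int) :
    (s.set i a).getD j 0 = if i = j ∧ j < s.length then a else s.getD j 0 := by
  by_cases hj : j < s.length
  · rw [List.getD_eq_getElem _ _ (by simpa using hj), List.getElem_set]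
    split_ifs with h1 h2 h2 <;> simp_all
  · rw [List.getD_eq_default _ _ (by simpa using hj), List.getD_eq_default _ _ (by simpa using hj)]
    simp [hj]

theorem pv_setfold_len (c : Nat → Int) :
    ∀ (m : Nat) (s : List Int),
    ((List.range m).foldl (fun s t => s.set t (s.getD t 0 + c t)) s).length = s.length := by
  intro m
  induction m with
  | zero => intro s; simp
  | succ m ih =>
    intro s
    rw [List.range_succ, List.foldl_append, List.foldl_cons, List.foldl_nil, List.length_set, ih]

theorem pv_setfold_getD (c : Nat → Int) :
    ∀ (m : Nat) (s : List Int) (j : Nat),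
    ((List.range m).foldl (fun s t => s.set t (s.getD t 0 + c t)) s).getD j 0
      = s.getD j 0 + (if j < m ∧ j < s.length then c j else 0) := by
  intro m
  induction m with
  | zero => intro s j; simp
  | succ m ih =>
    intro s j
    rw [List.range_succ, List.foldl_append, List.foldl_cons, List.foldl_nil,
      pv_getD_set, pv_setfold_len, ih, ih]
    by_cases hj : j < s.length
    · by_cases hjm : j < m
      · rw [if_neg (by omega), if_pos ⟨hjm, hj⟩, if_pos (by omega)]
      · by_cases hje : m = j
        · subst hje
          rw [if_pos ⟨rfl, hj⟩, if_neg (by omega), if_pos (by omega)]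
          ring
        · rw [if_neg (by omega), if_neg (by omega), if_neg (by omega)]
    · simp [hj]

theorem pv_sum_ite {α : Type} (p : α → Prop) [DecidablePred p] (xs : List α) :
    (xs.map (fun x => if p x then (1 : Int) else 0)).sum = (xs.countP (fun x => decide (p x)) : Int) := by
  have := PySem.List.sum_map_ite_one_zero (fun x => decide (p x)) xs
  simpa using this

theorem pv_scatter (g : Nat → Nat) :
    ∀ (L : List Nat) (acc M : List Int),
    acc.length = M.length →
    (∀ t ∈ L, g t < M.length ∧ M.getD (g t) 0 = (t : Int)) →
    (∀ q, q < M.length → (∀ t ∈ L, g t ≠ q) → acc.getD q 0 = M.getD q 0) →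
    L.foldl (fun a t => a.set (g t) ((t : Int))) acc = M := by
  intro L
  induction L with
  | nil =>
    intro acc M hlen _ hq
    rw [List.foldl_nil]
    refine List.ext_getElem (by simpa using hlen) ?_
    intro q h1 h2
    have := hq q h2 (by simp)
    rwa [List.getD_eq_getElem _ _ h1, List.getD_eq_getElem _ _ h2] at this
  | cons t L ih =>
    intro acc M hlen hg hq
    rw [List.foldl_cons]
    refine ih _ M (by simpa using hlen) (fun t' ht' => hg t' (List.mem_cons_of_mem _ ht')) ?_
    intro q hql hne
    rw [pv_getD_set]
    by_cases hqt : g t = q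
    · rw [if_pos ⟨hqt, by omega⟩, show ((t : Nat) : Int) = M.getD q 0 from by
        rw [← hqt]; exact ((hg t List.mem_cons_self).2).symm]
    · rw [if_neg (by intro h; exact hqt h.1)]
      refine hq q hql ?_
      intro t' ht'
      rcases List.mem_cons.mp ht' with rfl | ht'
      · exact hqt
      · exact hne t' ht'

theorem pv_getD_replicate (n j : Nat) : (List.replicate n (0 : Int)).getD j 0 = 0 := by
  by_cases h : j < n
  · rw [List.getD_eq_getElem _ _ (by simpa using h), List.getElem_replicate]
  · rw [List.getD_eq_default _ _ (by simpa using h)]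

theorem pv_rowB (row : List Int) (s : List Int) :
    pvStepB s row
      = (List.range row.length).foldl (fun s t => s.set t (s.getD t 0 + pvCnt row t)) s := by
  rw [pvStepB, PySem.List.len_eq, PySem.List.pyRange_zero_natCast, List.foldl_map]
  congr 1
  funext s t
  simp only [PySem.List.pyGetD_natCast, PySem.List.pySetD_natCast, PySem.List.slice_to_natCast,
    pv_sum_ite, pvCnt]

theorem pv_outerB :
    ∀ (rows : List (List Int)) (s : List Int),
    (∀ row ∈ rows, row.length ≤ s.length) →
    ((rows.foldl pvStepB s).length = s.length)
     ∧ ( ∀ j : Nat, (rows.foldl pvStepB s).getD j 0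
        = s.getD j 0 + (rows.map (fun row => pvRowCnt row (j : Int))).sum) := by
  intro rows
  induction rows with
  | nil => intro s _; exact ⟨rfl, by simp⟩
  | cons row t ih =>
    intro s hb
    rw [List.foldl_cons, pv_rowB]
    have hlen := pv_setfold_len (pvCnt row) row.length s
    have hrec := ih ((List.range row.length).foldl (fun s t => s.set t (s.getD t 0 + pvCnt row t)) s)
      (fun r hr => by rw [hlen]; exact hb r (List.mem_cons_of_mem _ hr))
    refine ⟨by rw [hrec.1, hlen], ?_⟩
    intro j
    rw [hrec.2 j, pv_setfold_getD]
    have hrow := hb row List.mem_cons_self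
    have : (if j < row.length ∧ j < s.length then pvCnt row j else 0) = pvRowCnt row (j : Int) := by
      rw [pvRowCnt]
      by_cases h : j < row.length
      · rw [if_pos ⟨h, by omega⟩, if_pos (by omega),
          Int.toNat_natCast]
      · rw [if_neg (by omega), if_neg (by omega)]
    rw [this]
    simp only [List.map_cons, List.sum_cons]
    ring

theorem pv_ltb_split (fs : List Int) (t : Nat) :
    (PySem.List.enumerate fs).countP (pvLtB (fun p => p.2) (((t : Nat) : Int), fs.getD t 0)) = pvPos fs t := by
  have hfn : pvLtB (fun p => p.2) (((t : Nat) : Int), fs.getD t 0) = fun q =>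
      (fun q : Int × Int => decide (q.2 < fs.getD t 0)) q
      || ((fun q : Int × Int => decide (q.2 = fs.getD t 0) && decide (q.1 < ((t : Nat) : Int))) q) := by
    funext q
    rw [Bool.eq_iff_iff]
    simp [pvLtB]
  rw [hfn, pv_countP_or _ _ _ (by intro a _; simp; omega)]
  have e1 : (PySem.List.enumerate fs).countP (fun q => decide (q.2 < fs.getD t 0))
      = fs.countP (fun w => decide (w < fs.getD t 0)) := by
    simpa using pv_cnt_enum (fun w => decide (w < fs.getD t 0)) fs 0
  have e2 : (PySem.List.enumerate fs).countP
        (fun q => decide (q.2 = fs.getD t 0) && decide (q.1 < ((t : Nat) : Int)))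
      = (fs.take t).countP (fun w => decide (w = fs.getD t 0)) := by
    have := pv_cnt_enum_lt (fun w => decide (w = fs.getD t 0)) fs 0 ((t : Nat) : Int)
    simpa [show (((t : Nat) : Int) - 0).toNat = t from by omega] using this
  rw [e1, e2, pvPos]

theorem pv_final (fs : List Int) (acc : List Int) (hacc : acc.length = fs.length) :
    (List.range fs.length).foldl (fun a t => a.set (pvPos fs t) ((t : Int))) acc
      = (PySem.List.sorted (PySem.List.enumerate fs) (fun t => t.2) false).map (fun t => t.1) := by
  have hSlen : (PySem.List.sorted (PySem.List.enumerate fs) (fun t => t.2) false).length = fs.length := by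
    rw [PySem.List.length_sorted, PySem.List.length_enumerate]
  apply pv_scatter
  · rw [List.length_map, hSlen, hacc]
  · intro t ht
    have htl : t < fs.length := List.mem_range.mp ht
    have hmem : (((t : Nat) : Int), fs.getD t 0) ∈ PySem.List.enumerate fs := by
      rw [PySem.List.mem_enumerate_iff]
      refine ⟨t, htl, ?_⟩
      rw [List.getD_eq_getElem _ _ htl]
      norm_num
    have hmemS : (((t : Nat) : Int), fs.getD t 0)
        ∈ PySem.List.sorted (PySem.List.enumerate fs) (fun t => t.2) false := by
      rw [PySem.List.mem_sorted]; exact hmem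
    obtain ⟨k, hk, hke⟩ := List.getElem_of_mem hmemS
    have hcnt := pv_pos_eq (fun p => p.2) (PySem.List.enumerate fs)
      (PySem.List.pairwise_lt_enumerate fs 0) k hk
    rw [hke, pv_ltb_split] at hcnt
    constructor
    · rw [List.length_map, hSlen]; omega
    · rw [hcnt, List.getD_eq_getElem _ _ (by rw [List.length_map]; omega), List.getElem_map, hke]
  · intro q hq hne
    exfalso
    have hq' : q < (PySem.List.sorted (PySem.List.enumerate fs) (fun t => t.2) false).length := by
      rw [List.length_map] at hq; omega
    have hmem : (PySem.List.sorted (PySem.List.enumerate fs) (fun t => t.2) false)[q]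
        ∈ PySem.List.enumerate fs := by
      rw [← PySem.List.mem_sorted (key := fun t : Int × Int => t.2) (rev := false)]
      exact List.getElem_mem hq'
    obtain ⟨k2, hk2, he⟩ := (PySem.List.mem_enumerate_iff _ _ _).mp hmem
    have hcnt := pv_pos_eq (fun p => p.2) (PySem.List.enumerate fs)
      (PySem.List.pairwise_lt_enumerate fs 0) q hq'
    rw [he] at hcnt
    have he2 : ((0 : Int) + (k2 : Int), fs[k2]) = (((k2 : Nat) : Int), fs.getD k2 0) := by
      rw [List.getD_eq_getElem _ _ hk2]; norm_num
    rw [he2, pv_ltb_split] at hcnt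
    exact hne k2 (List.mem_range.mpr hk2) hcnt

-- the assembled equivalence
theorem pv_main : ∀ (ts : List (List Int)), Pre_tmi_filter_ranking ts →
    tmi_filter_ranking ts = tmi_filter_ranking_alt ts := by
  intro ts hpre
  obtain ⟨hne, hlen⟩ := hpre
  obtain ⟨r0, rest, rfl⟩ := List.exists_cons_of_ne_nil hne
  simp only [tmi_filter_ranking, tmi_filter_ranking_alt]
  have hget0 : PySem.List.pyGetD (r0 :: rest) 0 [] = r0 := by
    simp [PySem.List.pyGetD_zero_cons]
  rw [hget0]
  have hN' : PySem.List.len r0 = (r0.length : Int) := PySem.List.len_eq r0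
  rw [hN']
  have hb : ∀ row ∈ r0 :: rest, row.length ≤ (PySem.List.pyRepeat [(0 : Int)] (r0.length : Int)).length := by
    intro row hr
    rw [PySem.List.pyRepeat_singleton, List.length_replicate, Int.toNat_natCast]
    simpa using hlen row hr
  have hrep : PySem.List.pyRepeat [(0 : Int)] ((r0.length : Nat) : Int) = List.replicate r0.length (0 : Int) := by
    rw [PySem.List.pyRepeat_singleton, Int.toNat_natCast]
  rw [hrep] at hb ⊢
  -- name the B-side sums list
  have hstep : (fun sums row =>
      (PySem.List.pyRange 0 (PySem.List.len row) 1).foldl (fun sums i =>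
        let v := PySem.List.pyGetD row i 0
        PySem.List.pySetD sums i (PySem.List.pyGetD sums i 0
          + ((row.map (fun w => if v < w then (1 : Int) else 0)).sum
             + ((PySem.List.slice row none (some i)).map
                  (fun w => if w = v then (1 : Int) else 0)).sum))) sums) = pvStepB := rfl
  rw [hstep]
  have hFS := pv_outerB (r0 :: rest) (List.replicate r0.length (0 : Int)) hb
  set fsl := (r0 :: rest).foldl pvStepB (List.replicate r0.length (0 : Int)) with hFSdef
  have hFSlen : fsl.length = r0.length := by rw [hFS.1, List.length_replicate]
  have hFSgetD : ∀ j : Nat, fsl.getD j 0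
      = ((r0 :: rest).map (fun row => pvRowCnt row (j : Int))).sum := by
    intro j
    rw [hFS.2 j, pv_getD_replicate, zero_add]
  -- A side dictionary
  have hkeys := pv_keysA ((r0.length : Nat) : Int) (r0 :: rest) _ (pv_initA_keys _)
    (fun row hr => by have := hlen row hr; simp at this; omega)
  have hnodup : ((r0 :: rest).foldl (fun d tmi_k =>
      (PySem.List.enumerate (PySem.List.sorted (PySem.List.enumerate tmi_k) (fun t => t.2) true)).foldl
        (fun d p => d.insert p.2.1 (d.getD p.2.1 [] ++ [p.1])) d)
      ((PySem.List.pyRange 0 ((r0.length : Nat) : Int) 1).foldl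
        (fun d i => d.insert i ([] : List Int)) PySem.Dict.empty)).keys.Nodup := by
    rw [hkeys]; exact PySem.List.nodup_pyRange_one _ _
  have hAsum : ∀ j : Int, (((r0 :: rest).foldl (fun d tmi_k =>
      (PySem.List.enumerate (PySem.List.sorted (PySem.List.enumerate tmi_k) (fun t => t.2) true)).foldl
        (fun d p => d.insert p.2.1 (d.getD p.2.1 [] ++ [p.1])) d)
      ((PySem.List.pyRange 0 ((r0.length : Nat) : Int) 1).foldl
        (fun d i => d.insert i ([] : List Int)) PySem.Dict.empty)).getD j []).sum
      = ((r0 :: rest).map (fun row => pvRowCnt row j)).sum := by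
    intro j
    rw [pv_outerA, pv_initA_getD]
    simp
  -- rewrite A's rank-sum list into the enumeration of fsl
  rw [PySem.List.foldl_append_singleton_eq_map, List.nil_append,
    PySem.Dict.items_eq_map_keys _ hnodup [], List.map_map, hkeys]
  have hEP : List.map ((fun p : Int × List Int => (p.1, p.2.sum)) ∘ fun k => (k,
        ((r0 :: rest).foldl (fun d tmi_k =>
          (PySem.List.enumerate (PySem.List.sorted (PySem.List.enumerate tmi_k) (fun t => t.2) true)).foldl
            (fun d p => d.insert p.2.1 (d.getD p.2.1 [] ++ [p.1])) d)
          ((PySem.List.pyRange 0 ((r0.length : Nat) : Int) 1).foldl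
            (fun d i => d.insert i ([] : List Int)) PySem.Dict.empty)).getD k []))
      (PySem.List.pyRange 0 ((r0.length : Nat) : Int) 1)
      = PySem.List.enumerate fsl := by
    rw [PySem.List.enumerate_eq_map_pyRange fsl 0, PySem.List.len_eq, hFSlen]
    apply List.map_congr_left
    intro j hj
    have hjr := PySem.List.mem_pyRange_one.mp hj
    have hjn : ((j.toNat : Nat) : Int) = j := by omega
    simp only [Function.comp]
    rw [hAsum j, ← hjn, PySem.List.pyGetD_natCast, hFSgetD j.toNat, hjn]
  rw [hEP]
  -- B's placement loop is the scatter of pvPos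
  rw [PySem.List.pyRange_zero_natCast, List.foldl_map]
  have hbody : (fun (order : List Int) (t : Nat) =>
      let p := (fsl.map (fun s => if s < PySem.List.pyGetD fsl ((t : Nat) : Int) 0 then (1 : Int) else 0)).sum
               + ((PySem.List.slice fsl none (some ((t : Nat) : Int))).map
                    (fun s => if s = PySem.List.pyGetD fsl ((t : Nat) : Int) 0 then (1 : Int) else 0)).sum
      PySem.List.pySetD order p ((t : Nat) : Int))
      = fun (order : List Int) (t : Nat) => order.set (pvPos fsl t) ((t : Int)) := by
    funext order t
    simp only [PySem.List.pyGetD_natCast, PySem.List.slice_to_natCast, pv_sum_ite, pvPos]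
    rw [← Nat.cast_add, PySem.List.pySetD_natCast]
  rw [hbody, show List.range r0.length = List.range fsl.length from by rw [hFSlen],
    pv_final fsl (List.replicate r0.length (0 : Int)) (by rw [List.length_replicate, hFSlen])]

-- ===== VERDICT (by name: the statement is the Claim_ definition above) =====
theorem tmi_filter_ranking_spec : Claim_equal_tmi_filter_ranking := by
  intro ts _ hpre
  unfold Spec_tmi_filter_ranking
  exact pv_main ts hpre
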